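-- pv_equiv track=rewrite | github.com/tungduonghgg123/projectEuler100Challenge | 26.py | verifyPeriod
-- ===== SOURCE A (Python) =====
-- def verifyPeriod(decimal, period):
--     lengthOfPeriod = len(period)
--     possibleNumberOfPeriods = len(decimal) // lengthOfPeriod
--     sufficeTestTime = 10
--     if possibleNumberOfPeriods > sufficeTestTime:
--         possibleNumberOfPeriods = sufficeTestTime
--     count = 0
--     while(count < possibleNumberOfPeriods):
--         start = lengthOfPeriod * count
--         end = start + lengthOfPeriod
--         if not decimal[start : end] == period:
--             return False
--         count += 1
--     return True
-- ===== SOURCE B (Python) =====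
-- def verifyPeriod(decimal, period):
--     n = min(10, len(decimal) // len(period))
--     return decimal[:n * len(period)] == period * n
-- ===== Notes on version B (the rewrite author's own statement) =====
-- stated objective: simpler
-- what changed: Replaces the chunk-by-chunk while loop with a single comparison of the prefix decimal[:n*len(period)] against period repeated n times, n = min(10, len(decimal)//len(period)).
import Mathlib
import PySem

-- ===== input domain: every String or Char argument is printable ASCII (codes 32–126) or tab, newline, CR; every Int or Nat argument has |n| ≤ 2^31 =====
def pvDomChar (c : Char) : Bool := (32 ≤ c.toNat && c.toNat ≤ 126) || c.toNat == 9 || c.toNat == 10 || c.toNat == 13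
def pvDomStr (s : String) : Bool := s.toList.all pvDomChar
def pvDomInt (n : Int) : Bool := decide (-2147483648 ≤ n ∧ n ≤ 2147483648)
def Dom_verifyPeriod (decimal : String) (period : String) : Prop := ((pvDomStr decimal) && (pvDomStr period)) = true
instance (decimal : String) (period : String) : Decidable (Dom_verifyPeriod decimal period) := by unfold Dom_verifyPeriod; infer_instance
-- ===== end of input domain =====

-- B replaces A's chunk-by-chunk while loop by one comparison of a prefix against the repeated period (simpler).

-- ===== PORT A =====
-- A's while loop: count from 0 while count < n, comparing decimal[L*count : L*count+L] with period.
def verifyPeriodLoop (d p : List Char) (L n count : Nat) : Bool :=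
  if count < n then
    if PySem.List.slice d (some ((L * count : Nat) : Int)) (some ((L * count + L : Nat) : Int)) == p then
      verifyPeriodLoop d p L n (count + 1)
    else false
  else true
termination_by n - count

-- lengths and '//' act here on nonnegative Python ints, so Nat '/' is exact (period = '', where Python raises, is outside Pre_).
def verifyPeriod (decimal : String) (period : String) : Bool :=
  let d := decimal.toList
  let p := period.toList
  let lengthOfPeriod := p.length
  let possibleNumberOfPeriods := d.length / lengthOfPeriod
  let sufficeTestTime := 10
  let possibleNumberOfPeriods :=
    if possibleNumberOfPeriods > sufficeTestTime then sufficeTestTime else possibleNumberOfPeriods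
  verifyPeriodLoop d p lengthOfPeriod possibleNumberOfPeriods 0

-- ===== PORT B =====
-- B: n = min(10, len(decimal)//len(period)); decimal[:n*len(period)] == period*n.
def verifyPeriod_alt (decimal : String) (period : String) : Bool :=
  let d := decimal.toList
  let p := period.toList
  let n := min 10 (d.length / p.length)
  d.take (n * p.length) == (List.replicate n p).flatten

-- ===== PRECONDITION & SPEC =====
-- Pre_ excludes only period = "", on which the Python A raises ZeroDivisionError.
def Pre_verifyPeriod (decimal : String) (period : String) : Prop := period ≠ ""
instance (decimal : String) (period : String) : Decidable (Pre_verifyPeriod decimal period) := by unfold Pre_verifyPeriod; infer_instance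
def pvWitness_verifyPeriod : String × String := ("123123", "123")

def Spec_verifyPeriod (decimal : String) (period : String) (out : Bool) : Prop := out = verifyPeriod_alt decimal period
instance (decimal : String) (period : String) (out : Bool) : Decidable (Spec_verifyPeriod decimal period out) := by unfold Spec_verifyPeriod; infer_instance

-- ===== CLAIM (what is proved, stated in full; the proofs are below) =====
def Claim_equal_verifyPeriod : Prop := ∀ (decimal : String) (period : String), Dom_verifyPeriod decimal period → Pre_verifyPeriod decimal period → Spec_verifyPeriod decimal period (verifyPeriod decimal period)

-- ===== LEMMAS AND PROOFS =====

-- The loop from position `count` decides whether the remaining chunks up to n equal the repeated period.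
theorem verifyPeriodLoop_eq (d p : List Char) (n : Nat) :
    ∀ count, verifyPeriodLoop d p p.length n count =
      ((d.drop (p.length * count)).take ((n - count) * p.length)
        == (List.replicate (n - count) p).flatten) := by
  intro count
  by_cases h : count < n
  case neg =>
    rw [verifyPeriodLoop]
    simp [h, Nat.sub_eq_zero_of_le (Nat.le_of_not_lt h)]
  case pos =>
    rw [verifyPeriodLoop, if_pos h]
    have hslice : PySem.List.slice d (some ((p.length * count : Nat) : Int))
        (some ((p.length * count + p.length : Nat) : Int))
        = (d.drop (p.length * count)).take p.length := by
      simpa using PySem.List.slice_natCast d (p.length * count) (p.length * count + p.length)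
    have hm : (n - count) = (n - (count + 1)) + 1 := by omega
    rw [hslice, hm]
    have hsplit : (d.drop (p.length * count)).take (((n - (count + 1)) + 1) * p.length)
        = (d.drop (p.length * count)).take p.length
          ++ (d.drop (p.length * (count + 1))).take ((n - (count + 1)) * p.length) := by
      have e : ((n - (count + 1)) + 1) * p.length
          = p.length + (n - (count + 1)) * p.length := by ring
      rw [e, List.take_add, List.drop_drop, Nat.mul_succ]
    have hflat : (List.replicate ((n - (count + 1)) + 1) p).flatten
        = p ++ (List.replicate (n - (count + 1)) p).flatten := by
      simp [List.replicate_succ]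
    by_cases hc : (d.drop (p.length * count)).take p.length = p
    case pos =>
      rw [hc] at hsplit
      simp only [hc, beq_self_eq_true, if_true]
      rw [verifyPeriodLoop_eq d p n (count + 1), hsplit, hflat]
      rw [Bool.eq_iff_iff]
      simp
    case neg =>
      have hfalse : ((d.drop (p.length * count)).take p.length == p) = false :=
        beq_eq_false_iff_ne.mpr hc
      rw [hfalse]
      simp only [Bool.false_eq_true, if_false]
      symm
      rw [beq_eq_false_iff_ne]
      intro heq
      have hlen := congrArg List.length heq
      simp only [List.length_take, List.length_flatten, List.map_replicate,
        List.sum_replicate, smul_eq_mul, List.length_drop] at hlen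
      have hge : ((n - (count + 1)) + 1) * p.length ≤ (d.drop (p.length * count)).length := by
        simp only [List.length_drop]
        omega
      have hple : p.length ≤ (d.drop (p.length * count)).length :=
        le_trans (by nlinarith [Nat.zero_le ((n - (count+1)) * p.length)]) hge
      rw [hsplit, hflat] at heq
      have h1 : ((d.drop (p.length * count)).take p.length).length = p.length := by
        rw [List.length_take]
        omega
      exact hc ((List.append_inj heq h1).1)
termination_by count => n - count

-- ===== VERDICT (by name: the statement is the Claim_ definition above) =====
theorem verifyPeriod_spec : Claim_equal_verifyPeriod := by
  intro decimal period _ _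
  unfold Spec_verifyPeriod verifyPeriod verifyPeriod_alt
  simp only
  rw [verifyPeriodLoop_eq]
  have hmin : (if decimal.toList.length / period.toList.length > 10 then 10
      else decimal.toList.length / period.toList.length)
      = min 10 (decimal.toList.length / period.toList.length) := by
    split <;> omega
  rw [hmin]
  simp [Nat.mul_comm]
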